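-- pv_equiv track=rewrite | github.com/Arbaletos/UD_Esperanto-ETB | tools/con/conll.py | insert_spaces
-- ===== SOURCE A (Python) =====
-- def insert_spaces(text):
--   '''Add blank lines in conll before each sentence, if they are not here.'''
--   linearo = text.split('\n')
--   if linearo[-1] == '':
--       linearo = linearo[:-1]
--   for i in range(1,len(linearo)):
--     line = linearo[i]
--     pre_line = linearo[i-1]
--     if (line.startswith('1\t') or line.startswith('1-')) and len(pre_line) and pre_line[0] not in('#',' '):
--       linearo[i-1] +='\n'
--   return '\n'.join(linearo)
-- ===== SOURCE B (Python) =====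
-- def insert_spaces(text):
--   '''Add blank lines in conll before each sentence, if they are not here.'''
--   if text.endswith('\n'):
--     text = text[:-1]
--   out = []
--   eligible = False   # line read so far is nonempty and does not start with '#' or ' '
--   fresh = True       # next char starts a new line
--   i = 0
--   while i < len(text):
--     ch = text[i]
--     if ch == '\n':
--       if eligible and text[i+1:i+3] in ('1\t', '1-'):
--         out.append('\n')
--       eligible = False
--       fresh = True
--     elif fresh:
--       eligible = ch != '#' and ch != ' '
--       fresh = False
--     out.append(ch)
--     i += 1
--   return ''.join(out)
-- ===== Notes on version B (the rewrite author's own statement) =====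
-- stated objective: alternative
-- what changed: B never splits the text into a line list: it strips at most one trailing newline and then runs a single character-level state machine over the raw string (tracking line-start and line-eligibility flags, with a two-character lookahead after each newline) that emits an extra newline before each sentence start, instead of A's split-into-lines / index loop mutating predecessors / re-join.
import Mathlib
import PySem

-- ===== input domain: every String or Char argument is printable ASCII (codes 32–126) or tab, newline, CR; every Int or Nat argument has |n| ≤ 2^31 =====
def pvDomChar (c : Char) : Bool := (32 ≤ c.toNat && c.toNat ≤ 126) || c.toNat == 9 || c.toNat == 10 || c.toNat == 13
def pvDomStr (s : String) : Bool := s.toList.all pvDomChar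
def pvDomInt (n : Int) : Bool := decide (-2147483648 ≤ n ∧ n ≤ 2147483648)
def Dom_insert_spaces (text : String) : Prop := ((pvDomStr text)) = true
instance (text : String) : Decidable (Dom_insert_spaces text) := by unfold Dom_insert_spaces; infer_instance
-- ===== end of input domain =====

-- B replaces A's split-into-lines / index-loop-mutation / re-join by a single character-level state
-- machine over the raw string (after stripping at most one trailing newline); objective: alternative, same O(n) cost.

-- ===== PORT A =====
-- '(line.startswith('1\t') or line.startswith('1-')) and len(pre_line) and pre_line[0] not in ('#',' ')'
def condA (pre line : String) : Bool :=
  (PySem.Str.startswith line "1\t" || PySem.Str.startswith line "1-")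
  && PySem.Str.len pre != 0
  && (match PySem.Str.pyGet? pre 0 with
      | some c => !(c == '#' || c == ' ')
      | none => false)   -- unreachable: guarded by len(pre_line)

-- one iteration of A's 'for i in range(1, len(linearo))' body (reads linearo[i], linearo[i-1], may set linearo[i-1])
def insAStep (arr : List String) (i : Int) : List String :=
  match PySem.List.pyGet? arr i, PySem.List.pyGet? arr (i - 1) with
  | some line, some pre => if condA pre line then PySem.List.pySetD arr (i - 1) (pre ++ "\n") else arr
  | _, _ => arr   -- unreachable: i is in range

def insert_spaces (text : String) : String :=
  let linearo0 := (PySem.Str.split? text "\n").getD []   -- sep is the nonempty literal "\n", so split? is 'some'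
  let linearo := if PySem.List.pyGet? linearo0 (-1) == some "" then PySem.List.slice linearo0 none (some (-1)) else linearo0
  PySem.Str.join "\n" ((PySem.List.pyRange 1 (linearo.length : Int) 1).foldl insAStep linearo)

-- ===== PORT B =====
-- B's lookahead "text[i+1:i+3] in ('1\t', '1-')": exact, that length-≤2 slice equals '1\t' or '1-'
-- iff the next two characters exist and are '1' then '\t' or '-'.
def lookB : List Char → Bool
  | c1 :: c2 :: _ => c1 == '1' && (c2 == '\t' || c2 == '-')
  | _ => false

-- B's while loop over the characters, as structural recursion: the rest of the list is the part
-- from index i+1 on, so the slice lookahead reads the first two elements of 'rest' (exact).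
def scanB : List Char → Bool → Bool → List Char
  | [], _, _ => []
  | c :: rest, eligible, fresh =>
    if c = '\n' then
      (if eligible && lookB rest then ['\n'] else []) ++ '\n' :: scanB rest false true
    else if fresh then
      c :: scanB rest (c != '#' && c != ' ') false
    else
      c :: scanB rest eligible false

def insert_spaces_alt (text : String) : String :=
  let t := if PySem.Str.endswith text "\n" then PySem.Str.slice text none (some (-1)) else text
  String.ofList (scanB t.toList false true)

-- ===== PRECONDITION & SPEC =====
def Spec_insert_spaces (text : String) (out : String) : Prop := out = insert_spaces_alt text
instance (text : String) (out : String) : Decidable (Spec_insert_spaces text out) := by unfold Spec_insert_spaces; infer_instance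

-- ===== CLAIM (what is proved, stated in full; the proofs are below) =====
def Claim_equal_insert_spaces : Prop := ∀ (text : String), Dom_insert_spaces text → Spec_insert_spaces text (insert_spaces text)

-- ===== LEMMAS AND PROOFS =====

-- ---- A-side: the list A's loop produces (each line preceding a sentence start gets '\n' appended) ----
def mark : List String → List String
  | [] => []
  | [x] => [x]
  | x :: y :: t => (if condA x y then x ++ "\n" else x) :: mark (y :: t)

theorem length_mark (L : List String) : (mark L).length = L.length := by
  induction L with
  | nil => rfl
  | cons x t ih => cases t with
    | nil => rfl
    | cons y t' => simp [mark] at ih ⊢; omega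

theorem mark_ne_nil {L : List String} (h : L ≠ []) : mark L ≠ [] := by
  have := length_mark L
  intro hc; rw [hc] at this; simp at this; exact h (List.length_eq_zero_iff.mp this.symm)

theorem getLast?_cons_ne_nil {α : Type} (x : α) {l : List α} (h : l ≠ []) :
    (x :: l).getLast? = l.getLast? := by
  cases l with
  | nil => simp at h
  | cons y t => simp [List.getLast?_cons_cons]

theorem getLast?_mark (L : List String) : (mark L).getLast? = L.getLast? := by
  induction L with
  | nil => rfl
  | cons x t ih => cases t with
    | nil => rfl
    | cons y t' =>
      rw [mark, getLast?_cons_ne_nil _ (mark_ne_nil (by simp)), ih]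
      exact (getLast?_cons_ne_nil x (l := y :: t') (by simp)).symm

theorem length_insAStep (arr : List String) (i : Int) : (insAStep arr i).length = arr.length := by
  unfold insAStep
  cases h1 : PySem.List.pyGet? arr i <;> cases h2 : PySem.List.pyGet? arr (i-1) <;> simp
  split <;> simp [PySem.List.length_pySetD]

theorem pyGet?_append_left' {α : Type} (arr l2 : List α) (i : Int) (h0 : 0 ≤ i)
    (h : i < arr.length) : PySem.List.pyGet? (arr ++ l2) i = PySem.List.pyGet? arr i := by
  rw [PySem.List.pyGet?_of_nonneg _ h0, PySem.List.pyGet?_of_nonneg _ h0,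
      List.getElem?_append_left (by omega)]

theorem insAStep_append (arr : List String) (z : String) (i : Int)
    (h1 : 1 ≤ i) (h2 : i < arr.length) :
    insAStep (arr ++ [z]) i = insAStep arr i ++ [z] := by
  unfold insAStep
  rw [pyGet?_append_left' arr [z] i (by omega) h2,
      pyGet?_append_left' arr [z] (i-1) (by omega) (by omega)]
  cases hl : PySem.List.pyGet? arr i <;> cases hp : PySem.List.pyGet? arr (i-1) <;> simp
  split
  · rw [PySem.List.pySetD_of_nonneg _ _ (by omega), PySem.List.pySetD_of_nonneg _ _ (by omega),
        List.set_append_left _ _ (by omega)]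
  · rfl

theorem foldl_insAStep_append (is : List Int) (arr : List String) (z : String)
    (h : ∀ i ∈ is, 1 ≤ i ∧ i < arr.length) :
    (is.foldl insAStep (arr ++ [z])) = is.foldl insAStep arr ++ [z] := by
  induction is generalizing arr with
  | nil => rfl
  | cons i rest ih =>
    have hi := h i (by simp)
    simp only [List.foldl_cons]
    rw [insAStep_append arr z i hi.1 hi.2, ih (insAStep arr i)
      (fun j hj => by have := h j (List.mem_cons_of_mem _ hj); rw [length_insAStep]; exact this)]

theorem mark_append_singleton (M : List String) (z : String) (h : M ≠ []) :
    mark (M ++ [z])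
      = (mark M).set (M.length - 1)
          (if condA (M.getLast h) z then M.getLast h ++ "\n" else M.getLast h) ++ [z] := by
  induction M with
  | nil => simp at h
  | cons x t ih =>
    cases t with
    | nil => simp [mark]
    | cons y t' =>
      have hne : (y :: t') ≠ ([] : List String) := by simp
      have e1 : (x :: y :: t') ++ [z] = x :: y :: (t' ++ [z]) := rfl
      rw [e1, show mark (x :: y :: (t' ++ [z]))
            = (if condA x y then x ++ "\n" else x) :: mark (y :: (t' ++ [z])) from rfl,
          show (y :: (t' ++ [z])) = (y :: t') ++ [z] from rfl, ih hne]
      rw [List.getLast_cons hne, mark]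
      have e3 : (x :: y :: t').length - 1 = ((y :: t').length - 1) + 1 := by simp
      rw [e3, List.set_cons_succ]
      rfl

theorem mark_getElem_last (M : List String) (hM : M ≠ []) :
    (mark M)[M.length - 1]? = some (M.getLast hM) := by
  have h1 : (mark M).getLast? = some (M.getLast hM) := by
    rw [getLast?_mark, List.getLast?_eq_some_getLast hM]
  rw [← h1, List.getLast?_eq_getElem?, length_mark]

theorem loop_eq_mark (L : List String) :
    (PySem.List.pyRange 1 (L.length : Int) 1).foldl insAStep L = mark L := by
  induction L using List.reverseRecOn with
  | nil => simp [PySem.List.pyRange_one_eq_nil, mark]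
  | append_singleton M z ih =>
    cases hM : M with
    | nil => simp [PySem.List.pyRange_one_eq_nil, mark]
    | cons m0 ms =>
    rw [← hM]
    have hMne : M ≠ [] := by rw [hM]; simp
    have hk : 1 ≤ M.length := by rw [hM]; simp
    have hlen : ((M ++ [z]).length : Int) = (M.length : Int) + 1 := by simp
    rw [hlen, PySem.List.pyRange_one_succ_right (by exact_mod_cast hk), List.foldl_append]
    rw [foldl_insAStep_append _ _ _
      (fun i hi => by have := (PySem.List.mem_pyRange_one).mp hi; omega)]
    rw [ih]
    simp only [List.foldl_cons, List.foldl_nil]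
    unfold insAStep
    have hget1 : PySem.List.pyGet? (mark M ++ [z]) (M.length : Int) = some z := by
      rw [show ((M.length : Int)) = ((mark M).length : Int) by rw [length_mark]]
      exact PySem.List.pyGet?_append_length _ _ _
    have hget2 : PySem.List.pyGet? (mark M ++ [z]) ((M.length : Int) - 1)
        = some (M.getLast hMne) := by
      rw [PySem.List.pyGet?_of_nonneg _ (by omega),
          show ((M.length : Int) - 1).toNat = M.length - 1 by omega,
          List.getElem?_append_left (by rw [length_mark]; omega),
          mark_getElem_last M hMne]
    rw [hget1, hget2]
    simp only []
    rw [mark_append_singleton M z hMne]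
    split
    · rw [PySem.List.pySetD_of_nonneg _ _ (by omega),
          show ((M.length : Int) - 1).toNat = M.length - 1 by omega,
          List.set_append_left _ _ (by rw [length_mark]; omega)]
    · congr 1
      have := mark_getElem_last M hMne
      have hlt : M.length - 1 < (mark M).length := by rw [length_mark]; omega
      rw [List.getElem?_eq_getElem hlt] at this
      have hv : (mark M)[M.length - 1]'hlt = M.getLast hMne := by injection this
      rw [← hv, List.set_getElem_self]

-- ---- split characterisation: splitting on '\n' is this structural recursion ----
def splitNL (pre : List Char) : List Char → List (List Char)
  | [] => [pre]
  | c :: rest => if c = '\n' then pre :: splitNL [] rest else splitNL (pre ++ [c]) rest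

theorem splitNL_ne_nil (pre : List Char) (l : List Char) : splitNL pre l ≠ [] := by
  induction l generalizing pre with
  | nil => simp [splitNL]
  | cons c rest ih => simp only [splitNL]; split <;> simp [ih]

theorem splitOn_go_eq (l : List Char) : ∀ (fuel : Nat) (cur : List Char) (acc : List (List Char)),
    l.length ≤ fuel →
    PySem.Chars.splitOn.go ['\n'] fuel l cur acc = acc.reverse ++ splitNL cur.reverse l := by
  induction l with
  | nil =>
    intro fuel cur acc _
    cases fuel <;> simp [PySem.Chars.splitOn.go, splitNL]
  | cons c rest ih =>
    intro fuel cur acc hf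
    cases fuel with
    | zero => simp at hf
    | succ f =>
      rw [PySem.Chars.splitOn.go]
      by_cases hc : c = '\n'
      · subst hc
        simp only [List.isPrefixOf, Bool.and_true, beq_self_eq_true, if_pos]
        rw [show List.drop ['\n'].length ('\n' :: rest) = rest from rfl,
            ih f [] (cur.reverse :: acc) (by simpa using hf)]
        simp [splitNL]
      · have hpre : ['\n'].isPrefixOf (c :: rest) = false := by
          simp [List.isPrefixOf]; exact fun h => (hc h.symm).elim
        rw [if_neg (by simp [hpre]), ih f (c :: cur) acc (by simpa using hf)]
        simp [splitNL, hc]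

theorem splitOn_nl_eq (s : List Char) : PySem.Chars.splitOn s ['\n'] = splitNL [] s := by
  unfold PySem.Chars.splitOn
  simpa using splitOn_go_eq s (s.length + 1) [] [] (by omega)

theorem noNL_splitNL (l : List Char) : ∀ (pre : List Char), '\n' ∉ pre →
    ∀ p ∈ splitNL pre l, '\n' ∉ p := by
  induction l with
  | nil => intro pre hpre p hp; simp [splitNL] at hp; subst hp; exact hpre
  | cons c rest ih =>
    intro pre hpre p hp
    simp only [splitNL] at hp
    split at hp
    · rcases List.mem_cons.mp hp with h | h
      · subst h; exact hpre
      · exact ih [] (by simp) p h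
    · exact ih (pre ++ [c]) (by simp [hpre]; rename_i hc; exact fun h => hc h.symm) p hp

theorem joinNL_splitNL (l : List Char) : ∀ (pre : List Char),
    PySem.Chars.join ['\n'] (splitNL pre l) = pre ++ l := by
  induction l with
  | nil => intro pre; simp [splitNL, PySem.Chars.join_singleton]
  | cons c rest ih =>
    intro pre
    simp only [splitNL]
    by_cases hc : c = '\n'
    · subst hc
      rw [if_pos rfl]
      obtain ⟨q, r, hqr⟩ := List.exists_cons_of_ne_nil (splitNL_ne_nil [] rest)
      rw [hqr, PySem.Chars.join_cons_cons, ← hqr, ih []]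
      simp
    · rw [if_neg hc, ih (pre ++ [c])]
      simp

theorem splitNL_append_nl (l : List Char) : ∀ (pre : List Char),
    splitNL pre (l ++ ['\n']) = splitNL pre l ++ [[]] := by
  induction l with
  | nil => intro pre; simp [splitNL]
  | cons c rest ih =>
    intro pre
    simp only [List.cons_append, splitNL]
    split <;> simp [ih]

theorem splitNL_last_ne (l : List Char) : ∀ (pre : List Char) (c : Char), c ≠ '\n' →
    ∃ t, (splitNL pre (l ++ [c])).getLast? = some (t ++ [c]) := by
  induction l with
  | nil =>
    intro pre c hc
    exact ⟨pre, by simp [splitNL, hc]⟩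
  | cons d rest ih =>
    intro pre c hc
    simp only [List.cons_append, splitNL]
    split
    · obtain ⟨t, ht⟩ := ih [] c hc
      exact ⟨t, by rw [getLast?_cons_ne_nil _ (splitNL_ne_nil [] (rest ++ [c]))]; exact ht⟩
    · exact ih (pre ++ [d]) c hc

-- ---- B-side: how the scanner consumes one whole line ----
def eligC : List Char → Bool
  | [] => false
  | c :: _ => c != '#' && c != ' '

def condC (p q : List Char) : Bool := lookB q && eligC p

theorem scanB_noNL_mid (l : List Char) : ∀ (e : Bool), '\n' ∉ l → scanB l e false = l := by
  induction l with
  | nil => intro e _; rfl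
  | cons c rest ih =>
    intro e h
    have hc : c ≠ '\n' := fun hcc => h (by simp [hcc])
    simp only [scanB, if_neg hc]
    simp [ih e (fun hm => h (by simp [hm]))]

theorem scanB_noNL_start (l : List Char) (h : '\n' ∉ l) : scanB l false true = l := by
  cases l with
  | nil => rfl
  | cons c rest =>
    have hc : c ≠ '\n' := fun hcc => h (by simp [hcc])
    simp only [scanB, if_neg hc]
    simp [scanB_noNL_mid rest _ (fun hm => h (by simp [hm]))]

theorem scanB_mid_line (p : List Char) : ∀ (e : Bool) (r : List Char), '\n' ∉ p →
    scanB (p ++ '\n' :: r) e false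
      = p ++ (if e && lookB r then ['\n'] else []) ++ '\n' :: scanB r false true := by
  induction p with
  | nil => intro e r _; simp [scanB]
  | cons c p' ih =>
    intro e r h
    have hc : c ≠ '\n' := fun hcc => h (by simp [hcc])
    simp only [List.cons_append, scanB, if_neg hc]
    simp [ih e r (fun hm => h (by simp [hm]))]

theorem scanB_line (p : List Char) (r : List Char) (h : '\n' ∉ p) :
    scanB (p ++ '\n' :: r) false true
      = p ++ (if eligC p && lookB r then ['\n'] else []) ++ '\n' :: scanB r false true := by
  cases p with
  | nil => simp [scanB, eligC]
  | cons c p' =>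
    have hc : c ≠ '\n' := fun hcc => h (by simp [hcc])
    simp only [List.cons_append, scanB, if_neg hc]
    simp [scanB_mid_line p' _ r (fun hm => h (by simp [hm])), eligC]

theorem lookB_append (q r : List Char) (hr : r = [] ∨ ∃ r', r = '\n' :: r') :
    lookB (q ++ r) = lookB q := by
  match q with
  | c1 :: c2 :: q' => rfl
  | [] =>
    rcases hr with h | ⟨r', h⟩ <;> subst h <;> simp
    cases r' <;> simp [lookB]
  | [c] =>
    rcases hr with h | ⟨r', h⟩ <;> subst h <;> simp [lookB]

-- ---- the marked lines, at character level, and the main scan lemma ----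
def markC : List (List Char) → List (List Char)
  | [] => []
  | [p] => [p]
  | p :: q :: t => (if condC p q then p ++ ['\n'] else p) :: markC (q :: t)

theorem condA_eq (pl ql : List Char) :
    condA (String.ofList pl) (String.ofList ql) = condC pl ql := by
  unfold condA condC
  have hstart : (PySem.Str.startswith (String.ofList ql) "1\t"
      || PySem.Str.startswith (String.ofList ql) "1-") = lookB ql := by
    match ql with
    | [] => simp [PySem.Str.startswith, PySem.Chars.startswith, lookB]
    | [c] =>
      simp [PySem.Str.startswith, PySem.Chars.startswith, lookB]
      exact ⟨by simp [List.isPrefixOf], by simp [List.isPrefixOf]⟩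
    | c1 :: c2 :: q' =>
      simp [PySem.Str.startswith, PySem.Chars.startswith, lookB, List.isPrefixOf]
      cases h1 : c1 == '1' <;> cases h2 : c2 == '\t' <;> cases h3 : c2 == '-'
        <;> simp_all [beq_iff_eq] <;> simp_all [eq_comm]
  have helig : ((PySem.Str.len (String.ofList pl) != 0)
      && (match PySem.Str.pyGet? (String.ofList pl) 0 with
          | some c => !(c == '#' || c == ' ')
          | none => false)) = eligC pl := by
    match pl with
    | [] => simp [PySem.Str.len, eligC, PySem.Str.pyGet?]
    | c :: pl' =>
      have h0 : (((pl'.length : Int) + 1) != 0) = true := by simp only [bne_iff_ne]; omega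
      simp [PySem.Str.len, eligC, Bool.not_or, bne]
      omega
  rw [← hstart, ← helig]
  cases h1 : (PySem.Str.startswith (String.ofList ql) "1\t"
      || PySem.Str.startswith (String.ofList ql) "1-") <;> simp

theorem map_toList_mark (L : List (List Char)) :
    (mark (L.map String.ofList)).map String.toList = markC L := by
  induction L with
  | nil => rfl
  | cons p t ih =>
    cases t with
    | nil => simp [mark, markC]
    | cons q t' =>
      simp only [List.map_cons] at ih ⊢
      rw [show mark (String.ofList p :: String.ofList q :: t'.map String.ofList)
            = (if condA (String.ofList p) (String.ofList q)
                then String.ofList p ++ "\n" else String.ofList p)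
              :: mark (String.ofList q :: t'.map String.ofList) from rfl,
          markC, condA_eq]
      simp only [List.map_cons, ih]
      split <;> simp

theorem scan_join (parts : List (List Char)) (h : ∀ p ∈ parts, '\n' ∉ p) :
    scanB (PySem.Chars.join ['\n'] parts) false true
      = PySem.Chars.join ['\n'] (markC parts) := by
  induction parts with
  | nil => rfl
  | cons p t ih =>
    cases t with
    | nil =>
      rw [PySem.Chars.join_singleton, scanB_noNL_start p (h p (by simp)),
          show markC [p] = [p] from rfl, PySem.Chars.join_singleton]
    | cons q t' =>
      rw [PySem.Chars.join_cons_cons]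
      have hjoin : ∃ r, PySem.Chars.join ['\n'] (q :: t') = q ++ r
          ∧ (r = [] ∨ ∃ r', r = '\n' :: r') := by
        cases t' with
        | nil => exact ⟨[], by simp [PySem.Chars.join_singleton], Or.inl rfl⟩
        | cons u t'' =>
          exact ⟨'\n' :: PySem.Chars.join ['\n'] (u :: t''),
            by rw [PySem.Chars.join_cons_cons]; simp, Or.inr ⟨_, rfl⟩⟩
      obtain ⟨r, hr, hcond⟩ := hjoin
      have hlook : lookB (PySem.Chars.join ['\n'] (q :: t')) = lookB q := by
        rw [hr]; exact lookB_append q r hcond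
      have hline := scanB_line p (PySem.Chars.join ['\n'] (q :: t')) (h p (by simp))
      rw [show p ++ ['\n'] ++ PySem.Chars.join ['\n'] (q :: t')
            = p ++ '\n' :: PySem.Chars.join ['\n'] (q :: t') by simp,
          hline, ih (fun x hx => h x (by simp [hx])), hlook]
      rw [markC]
      have hmarkshape : ∃ m ms, markC (q :: t') = m :: ms := by
        cases t' with
        | nil => exact ⟨q, [], rfl⟩
        | cons u t'' => exact ⟨_, _, rfl⟩
      obtain ⟨m, ms, hm⟩ := hmarkshape
      rw [hm, PySem.Chars.join_cons_cons, ← hm]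
      unfold condC
      cases he : eligC p <;> cases hl : lookB q <;> simp

-- ---- assembly ----
theorem slice_neg_one_dropLast {α : Type} (L : List α) :
    PySem.List.slice L none (some (-1)) = L.dropLast := by
  simp [PySem.List.slice, List.dropLast_eq_take]

theorem split_eval (text : String) :
    (PySem.Str.split? text "\n").getD [] = List.map String.ofList (splitNL [] text.toList) := by
  rw [PySem.Str.split?.eq_1, show ("\n" : String).toList = ['\n'] from rfl,
      PySem.Chars.split?.eq_1]
  simp [splitOn_nl_eq]

theorem main_chars (s : List Char) :
    PySem.Str.join "\n" ((PySem.List.pyRange 1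
        (((List.map String.ofList (splitNL [] s)).length : Int)) 1).foldl insAStep
        (List.map String.ofList (splitNL [] s)))
      = String.ofList (scanB s false true) := by
  rw [loop_eq_mark, ← String.toList_inj, PySem.Str.toList_join, map_toList_mark,
      show ("\n" : String).toList = ['\n'] from rfl]
  rw [← scan_join (splitNL [] s) (noNL_splitNL s [] (by simp)), joinNL_splitNL s []]
  simp

theorem final_chars (s : List Char) :
    insert_spaces (String.ofList s) = insert_spaces_alt (String.ofList s) := by
  induction s using List.reverseRecOn with
  | nil => decide
  | append_singleton s' c _ =>
    unfold insert_spaces insert_spaces_alt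
    rw [split_eval]
    simp only [String.toList_ofList]
    by_cases hc : c = '\n'
    · subst hc
      have hsplit : splitNL [] (s' ++ ['\n']) = splitNL [] s' ++ [[]] := splitNL_append_nl s' []
      have hlast : PySem.List.pyGet? (List.map String.ofList (splitNL [] (s' ++ ['\n']))) (-1)
          = some "" := by
        rw [hsplit]
        simp only [List.map_append, List.map_cons, List.map_nil]
        exact PySem.List.pyGet?_neg_one_append_singleton _ _
      rw [hlast]
      have hend : PySem.Str.endswith (String.ofList (s' ++ ['\n'])) "\n" = true := by
        rw [PySem.Str.endswith_eq]
        exact (PySem.Chars.endswith_iff _ _).mpr (by simp)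
      rw [if_pos (by simp), if_pos hend, slice_neg_one_dropLast, hsplit]
      simp only [List.map_append, List.map_cons, List.map_nil, List.dropLast_concat]
      have ht : (PySem.Str.slice (String.ofList (s' ++ ['\n'])) none (some (-1))).toList = s' := by
        rw [PySem.Str.slice_to_neg_one]
        simp
      rw [ht]
      exact main_chars s'
    · obtain ⟨t, ht⟩ := splitNL_last_ne s' [] c hc
      have hlast : PySem.List.pyGet? (List.map String.ofList (splitNL [] (s' ++ [c]))) (-1)
          = some (String.ofList (t ++ [c])) := by
        rw [PySem.List.pyGet?_neg_one, List.getLast?_map, ht]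
        rfl
      have hne : (String.ofList (t ++ [c]) == "") = false := by
        apply beq_eq_false_iff_ne.mpr
        intro hcc
        have := congrArg String.toList hcc
        simp at this
      rw [hlast]
      have hend : PySem.Chars.endswith (s' ++ [c]) ['\n'] = false := by
        apply Bool.eq_false_iff.mpr
        intro hsuf
        obtain ⟨pre, hp⟩ := (PySem.Chars.endswith_iff _ _).mp hsuf
        have := congrArg List.getLast? hp
        simp at this
        exact hc this.symm
      rw [show ((some (String.ofList (t ++ [c])) == some "") = false) from by
        simp only [Option.some_beq_some, hne]]
      rw [if_neg (by simp), if_neg (by simp [hend])]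
      simp only [String.toList_ofList]
      exact main_chars (s' ++ [c])

-- ===== VERDICT (by name: the statement is the Claim_ definition above) =====
theorem insert_spaces_spec : Claim_equal_insert_spaces := by
  intro text _
  unfold Spec_insert_spaces
  have h : text = String.ofList text.toList := by simp
  rw [h]
  exact final_chars text.toList
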